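-- pv_equiv track=rewrite | github.com/fineman999/Algorithm | BaekJoon/Gold/AC.py | solution
-- ===== SOURCE A (Python) =====
-- from collections import deque
--
-- def solution(p, n, arr):
--     if arr[0] == '':
--         arr = deque()
--     else:
--         arr = deque(arr)
--     check = 1
--     for i in range(len(p)):
--         if p[i] == 'R':
--             check = check*-1
--         else:
--             if len(arr) < 1:
--                 return 'error'
--             else:
--                 if check == 1:
--                     arr.popleft()
--                 else:
--                     arr.pop()
--     arr = list(arr)
--     if check == 1:
--         return f'[{",".join(arr)}]'
--
--     return f'[{",".join(arr[::-1])}]'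
-- ===== SOURCE B (Python) =====
-- def solution(p, n, arr):
--     lst = [] if arr[0] == '' else arr
--     rev = False
--     l = r = 0
--     for c in p:
--         if c == 'R':
--             rev = not rev
--         elif rev:
--             r += 1
--         else:
--             l += 1
--     if l + r > len(lst):
--         return 'error'
--     core = lst[l:len(lst)-r]
--     if rev:
--         core = core[::-1]
--     return '[' + ','.join(core) + ']'
-- ===== Notes on version B (the rewrite author's own statement) =====
-- stated objective: alternative
-- what changed: B never builds or mutates a deque: one pass over p keeps a direction flag and two drop counters, then the answer is a single slice of the original list (reversed iff the final direction is reversed), instead of A's per-command deque pops; Pre_ only excludes arr == [], where both programs raise IndexError at arr[0].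
import Mathlib
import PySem

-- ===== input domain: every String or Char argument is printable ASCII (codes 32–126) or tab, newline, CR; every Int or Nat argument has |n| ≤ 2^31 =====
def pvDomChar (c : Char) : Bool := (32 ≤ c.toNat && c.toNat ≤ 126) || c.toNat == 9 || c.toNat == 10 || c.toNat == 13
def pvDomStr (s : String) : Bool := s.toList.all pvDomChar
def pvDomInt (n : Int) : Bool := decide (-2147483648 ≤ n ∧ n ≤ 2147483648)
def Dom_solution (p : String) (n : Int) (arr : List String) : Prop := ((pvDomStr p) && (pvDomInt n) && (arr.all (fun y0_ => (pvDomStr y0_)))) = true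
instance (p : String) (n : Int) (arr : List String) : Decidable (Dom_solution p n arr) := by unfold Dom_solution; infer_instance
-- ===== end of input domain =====

-- B replaces A's deque simulation by one counting pass over p plus a single slice of arr;
-- equivalence of the RETURN value is proved (neither version mutates its arguments' caller-visible state).

-- ===== PORT A =====
-- A's for-loop over p with the early 'error' return: none = the early return was taken.
-- deque.popleft = tail, deque.pop = dropLast (the deque is nonempty in those branches).
def aLoop : List Char → List String → Int → Option (List String × Int)
  | [], arr, check => some (arr, check)
  | c :: cs, arr, check =>
    if c = 'R' then aLoop cs arr (check * -1)
    else if arr.length < 1 then none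
    else if check = 1 then aLoop cs arr.tail check
    else aLoop cs arr.dropLast check

def solution (p : String) (n : Int) (arr : List String) : String :=
  match PySem.List.pyGet? arr 0 with
  | none => ""   -- arr[0] raises IndexError on arr = []; excluded by Pre_solution
  | some a0 =>
    let dq : List String := if a0 = "" then [] else arr
    match aLoop p.toList dq 1 with
    | none => "error"
    | some (res, check) =>
      if check = 1 then "[" ++ PySem.Str.join "," res ++ "]"
      -- res[::-1] = res.reverse (PySem.List.slice?_none_none_neg_one)
      else "[" ++ PySem.Str.join "," res.reverse ++ "]"

-- ===== PORT B =====
-- one pass over p: direction flag, left- and right-drop counters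
def bLoop : List Char → Bool → Nat → Nat → Bool × Nat × Nat
  | [], rev, l, r => (rev, l, r)
  | c :: cs, rev, l, r =>
    if c = 'R' then bLoop cs (!rev) l r
    else if rev then bLoop cs rev l (r + 1)
    else bLoop cs rev (l + 1) r

def solution_alt (p : String) (n : Int) (arr : List String) : String :=
  match PySem.List.pyGet? arr 0 with
  | none => ""   -- arr[0] raises IndexError on arr = []; excluded by Pre_solution
  | some a0 =>
    let lst : List String := if a0 = "" then [] else arr
    match bLoop p.toList false 0 0 with
    | (rev, l, r) =>
      if lst.length < l + r then "error"
      else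
        -- lst[l : len(lst)-r]
        let core := PySem.List.slice lst (some (l : Int)) (some ((lst.length : Int) - (r : Int)))
        -- core[::-1] = core.reverse (PySem.List.slice?_none_none_neg_one)
        let core' := if rev then core.reverse else core
        "[" ++ PySem.Str.join "," core' ++ "]"

-- ===== PRECONDITION & SPEC =====
-- Pre_ excludes only arr = [], where the Python A raises IndexError at arr[0] (B does too).
def Pre_solution (p : String) (n : Int) (arr : List String) : Prop := arr ≠ []
instance (p : String) (n : Int) (arr : List String) : Decidable (Pre_solution p n arr) := by unfold Pre_solution; infer_instance
def pvWitness_solution : String × Int × List String := ("RDD", 3, ["1", "2", "3"])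

def Spec_solution (p : String) (n : Int) (arr : List String) (out : String) : Prop := out = solution_alt p n arr
instance (p : String) (n : Int) (arr : List String) (out : String) : Decidable (Spec_solution p n arr out) := by unfold Spec_solution; infer_instance

-- ===== CLAIM (what is proved, stated in full; the proofs are below) =====
def Claim_equal_solution : Prop := ∀ (p : String) (n : Int) (arr : List String), Dom_solution p n arr → Pre_solution p n arr → Spec_solution p n arr (solution p n arr)

-- ===== LEMMAS AND PROOFS =====

-- accumulator lemma for B's counters
theorem bLoop_acc (cs : List Char) (rev : Bool) (l r : Nat) :
    bLoop cs rev l r = ((bLoop cs rev 0 0).1, l + (bLoop cs rev 0 0).2.1, r + (bLoop cs rev 0 0).2.2) := by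
  induction cs generalizing rev l r with
  | nil => simp [bLoop]
  | cons c cs ih =>
    simp only [bLoop]
    split_ifs with h1 h2
    · exact ih (!rev) l r
    · rw [ih rev l (r + 1), ih rev 0 (0 + 1)]
      simp; omega
    · rw [ih rev (l + 1) r, ih rev (0 + 1) 0]
      simp; omega

-- the core correspondence: A's deque loop equals B's counting loop plus a slice
theorem loop_eq (cs : List Char) (arr : List String) (rev : Bool) :
    aLoop cs arr (if rev then -1 else 1) =
      (if arr.length < (bLoop cs rev 0 0).2.1 + (bLoop cs rev 0 0).2.2 then none
       else some ((arr.drop (bLoop cs rev 0 0).2.1).take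
                    (arr.length - (bLoop cs rev 0 0).2.2 - (bLoop cs rev 0 0).2.1),
                  if (bLoop cs rev 0 0).1 then -1 else 1)) := by
  induction cs generalizing arr rev with
  | nil => simp [aLoop, bLoop]
  | cons c cs ih =>
    by_cases hR : c = 'R'
    · have hc : (if rev then (-1 : Int) else 1) * -1 = (if !rev then -1 else 1) := by
        cases rev <;> norm_num
      simp only [aLoop, bLoop, hR, hc]
      simpa using ih arr (!rev)
    · cases rev with
      | false =>
        rcases h : bLoop cs false 0 0 with ⟨rev', l0, r0⟩
        have hB : bLoop (c :: cs) false 0 0 = (rev', 1 + l0, r0) := by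
          have := bLoop_acc cs false (0 + 1) 0
          rw [h] at this
          simp [bLoop, hR] at this ⊢
          simp [this]
        rw [hB]
        simp only [aLoop, hR]
        norm_num
        cases arr with
        | nil => simp
        | cons x xs =>
          have ih' : aLoop cs xs (1 : Int) =
              (if xs.length < l0 + r0 then none
               else some ((xs.drop l0).take (xs.length - r0 - l0),
                          if rev' then -1 else 1)) := by
            have := ih xs false
            rw [h] at this
            exact this
          rw [if_neg (by simp : ¬(x :: xs = []))]
          simp only [List.tail_cons, List.length_cons]
          rw [ih']
          split_ifs with h1 h2 h2 <;> try first | rfl | (exfalso; omega)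
          all_goals
            refine congrArg some (Prod.ext ?_ rfl)
            have hdrop : (x :: xs).drop (1 + l0) = xs.drop l0 := by
              rw [Nat.add_comm]; simp
            have hlen : xs.length + 1 - r0 - (1 + l0) = xs.length - r0 - l0 := by omega
            rw [hdrop, hlen]
      | true =>
        rcases h : bLoop cs true 0 0 with ⟨rev', l0, r0⟩
        have hB : bLoop (c :: cs) true 0 0 = (rev', l0, 1 + r0) := by
          have := bLoop_acc cs true 0 (0 + 1)
          rw [h] at this
          simp [bLoop, hR] at this ⊢
          simp [this]
        rw [hB]
        simp only [aLoop, hR]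
        norm_num
        cases arr with
        | nil => simp
        | cons x xs =>
          have ih' : aLoop cs (x :: xs).dropLast (-1 : Int) =
              (if (x :: xs).dropLast.length < l0 + r0 then none
               else some (((x :: xs).dropLast.drop l0).take ((x :: xs).dropLast.length - r0 - l0),
                          if rev' then -1 else 1)) := by
            have := ih (x :: xs).dropLast true
            rw [h] at this
            exact this
          rw [if_neg (by simp : ¬(x :: xs = [])), ih']
          simp only [List.length_cons, List.length_dropLast, Nat.add_sub_cancel]
          split_ifs with h1 h2 h2 <;> try first | rfl | (exfalso; omega)
          all_goals
            refine congrArg some (Prod.ext ?_ rfl)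
            have hdl : (x :: xs).dropLast = (x :: xs).take xs.length := by
              simp [List.dropLast_eq_take]
            rw [hdl, List.drop_take, List.take_take]
            have hmin : min (xs.length - r0 - l0) (xs.length - l0) = xs.length + 1 - (1 + r0) - l0 := by
              omega
            rw [hmin]

theorem solution_spec : Claim_equal_solution := by
  intro p n arr _ hpre
  unfold Spec_solution solution solution_alt
  cases arr with
  | nil => exact absurd rfl hpre
  | cons x xs =>
    have hget : PySem.List.pyGet? (x :: xs) 0 = some x := by
      simp [PySem.List.pyGet?, PySem.List.pyIdx?]
    rw [hget]
    dsimp only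
    have hloop := loop_eq p.toList (if x = "" then [] else x :: xs) false
    rcases h : bLoop p.toList false 0 0 with ⟨rev', l0, r0⟩
    rw [h] at hloop
    set lst : List String := if x = "" then [] else x :: xs with hlst
    norm_num at hloop
    rw [hloop]
    by_cases hlt : lst.length < l0 + r0
    · simp [hlt]
    · have hle : l0 + r0 ≤ lst.length := by omega
      have hslice : PySem.List.slice lst (some (l0 : Int)) (some ((lst.length : Int) - (r0 : Int))) =
          (lst.drop l0).take (lst.length - r0 - l0) := by
        have hr : r0 ≤ lst.length := by omega
        have hnn : (0 : Int) ≤ (lst.length : Int) - (r0 : Int) := by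
          have : (r0 : Int) ≤ (lst.length : Int) := by exact_mod_cast hr
          omega
        rw [PySem.List.slice_toNat lst (by positivity) hnn]
        have h1 : ((l0 : Int)).toNat = l0 := by simp
        have h2 : ((lst.length : Int) - (r0 : Int)).toNat = lst.length - r0 := by omega
        rw [h1, h2]
      simp only [if_neg hlt, hslice]
      cases rev' <;> simp
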